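-- pv_equiv track=rewrite | github.com/LyndenCooke/my-phonics | validate_words.py | has_consonant_cluster
-- ===== SOURCE A (Python) =====
-- VOWEL_GRAPHEMES = {
--     "a", "e", "i", "o", "u",
--     "ai", "ee", "igh", "oa", "oo", "ar", "or", "ur", "ow", "oi",
--     "ear", "air", "ure", "er",
--     "ay", "ou", "ie", "ea", "oy", "ir", "ue", "aw", "ew", "oe", "au",
--     "a-e", "e-e", "i-e", "o-e", "u-e"
-- }
--
-- def has_consonant_cluster(grapheme_list):
--     """
--     Check if a list of graphemes contains adjacent consonant graphemes.
--     Two or more consonant graphemes next to each other = cluster.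
--     "sh" counts as ONE consonant grapheme, not two.
--     """
--     consonant_run = 0
--     for g in grapheme_list:
--         if g in VOWEL_GRAPHEMES:
--             if consonant_run >= 2:
--                 return True
--             consonant_run = 0
--         else:
--             consonant_run += 1
--     # Check final consonant run
--     if consonant_run >= 2:
--         return True
--     return False
-- ===== SOURCE B (Python) =====
-- VOWEL_GRAPHEMES = {
--     "a", "e", "i", "o", "u",
--     "ai", "ee", "igh", "oa", "oo", "ar", "or", "ur", "ow", "oi",
--     "ear", "air", "ure", "er",
--     "ay", "ou", "ie", "ea", "oy", "ir", "ue", "aw", "ew", "oe", "au",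
--     "a-e", "e-e", "i-e", "o-e", "u-e"
-- }
--
-- def has_consonant_cluster(grapheme_list):
--     """A cluster exists iff some two ADJACENT graphemes are both consonants."""
--     return any(a not in VOWEL_GRAPHEMES and b not in VOWEL_GRAPHEMES
--                for a, b in zip(grapheme_list, grapheme_list[1:]))
-- ===== Notes on version B (the rewrite author's own statement) =====
-- stated objective: simpler
-- what changed: Replaced the running consonant-counter loop with early returns by a stateless pairwise scan: a cluster exists iff two adjacent graphemes are both consonants.
import Mathlib
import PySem

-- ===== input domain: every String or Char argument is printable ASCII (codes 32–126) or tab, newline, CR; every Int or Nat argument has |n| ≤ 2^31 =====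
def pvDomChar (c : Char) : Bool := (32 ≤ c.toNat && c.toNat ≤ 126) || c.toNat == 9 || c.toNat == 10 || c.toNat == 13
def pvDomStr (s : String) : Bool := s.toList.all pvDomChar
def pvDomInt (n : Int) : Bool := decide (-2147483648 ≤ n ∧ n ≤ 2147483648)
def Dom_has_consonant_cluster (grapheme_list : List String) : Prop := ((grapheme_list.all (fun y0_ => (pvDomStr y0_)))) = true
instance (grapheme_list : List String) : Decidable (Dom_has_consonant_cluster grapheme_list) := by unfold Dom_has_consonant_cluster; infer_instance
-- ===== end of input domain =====

-- B replaces A's running consonant-counter with a stateless adjacent-pair scan (simpler, same O(n) cost).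


-- ===== PORT A =====
-- VOWEL_GRAPHEMES: module-level set of strings (distinct elements, as a PySem.Set-style list)
def VOWEL_GRAPHEMES : List String :=
  ["a", "e", "i", "o", "u",
   "ai", "ee", "igh", "oa", "oo", "ar", "or", "ur", "ow", "oi",
   "ear", "air", "ure", "er",
   "ay", "ou", "ie", "ea", "oy", "ir", "ue", "aw", "ew", "oe", "au",
   "a-e", "e-e", "i-e", "o-e", "u-e"]

-- A's loop: running consonant counter, early return on a vowel after a run ≥ 2, final-run check.
def hccLoopA : List String → Nat → Bool
  | [], consonant_run => decide (consonant_run ≥ 2)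
  | g :: rest, consonant_run =>
      if VOWEL_GRAPHEMES.contains g then
        if consonant_run ≥ 2 then true else hccLoopA rest 0
      else
        hccLoopA rest (consonant_run + 1)

def has_consonant_cluster (grapheme_list : List String) : Bool :=
  hccLoopA grapheme_list 0

-- ===== PORT B =====
-- B: any adjacent pair of graphemes both consonants (zip(l, l[1:]) scan).
def hccPairsB : List String → Bool
  | a :: b :: rest =>
      (!(VOWEL_GRAPHEMES.contains a) && !(VOWEL_GRAPHEMES.contains b)) || hccPairsB (b :: rest)
  | _ => false

def has_consonant_cluster_alt (grapheme_list : List String) : Bool :=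
  hccPairsB grapheme_list

-- ===== PRECONDITION & SPEC =====
def Spec_has_consonant_cluster (grapheme_list : List String) (out : Bool) : Prop := out = has_consonant_cluster_alt grapheme_list
instance (grapheme_list : List String) (out : Bool) : Decidable (Spec_has_consonant_cluster grapheme_list out) := by unfold Spec_has_consonant_cluster; infer_instance

-- ===== CLAIM (what is proved, stated in full; the proofs are below) =====
def Claim_equal_has_consonant_cluster : Prop := ∀ (grapheme_list : List String), Dom_has_consonant_cluster grapheme_list → Spec_has_consonant_cluster grapheme_list (has_consonant_cluster grapheme_list)

-- ===== LEMMAS AND PROOFS =====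

-- Once the counter is ≥ 2, A eventually returns true.
theorem hccLoopA_ge_two (l : List String) (n : Nat) (h : 2 ≤ n) : hccLoopA l n = true := by
  induction l generalizing n with
  | nil => simp [hccLoopA]; omega
  | cons g rest ih =>
      simp only [hccLoopA]
      split
      · simp [h]
      · exact ih (n + 1) (by omega)

-- Counter state 0 corresponds exactly to B's pairwise scan.
theorem hccLoopA_zero_eq (l : List String) : hccLoopA l 0 = hccPairsB l := by
  induction l with
  | nil => rfl
  | cons a rest ih =>
      cases rest with
      | nil => simp [hccLoopA, hccPairsB]
      | cons b rest' =>
          by_cases ha : a ∈ VOWEL_GRAPHEMES <;> by_cases hb : b ∈ VOWEL_GRAPHEMES <;>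
            simp [hccLoopA, hccPairsB, ha, hb] at ih ⊢ <;>
            first
              | exact ih
              | simp [hccLoopA_ge_two rest' 2 (by omega)]

-- ===== VERDICT (by name: the statement is the Claim_ definition above) =====
theorem has_consonant_cluster_spec : Claim_equal_has_consonant_cluster := by
  intro l _
  unfold Spec_has_consonant_cluster has_consonant_cluster has_consonant_cluster_alt
  exact hccLoopA_zero_eq l
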